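-- pv_equiv track=rewrite | github.com/Xuniverzadmin/agenticverz_2.0 | scripts/migration/layer_analysis.py | strip_type_checking_blocks
-- ===== SOURCE A (Python) =====
-- def strip_type_checking_blocks(content: str) -> str:
--     """
--     Remove TYPE_CHECKING conditional blocks from content.
--
--     TYPE_CHECKING imports are for type hints only and don't run at runtime.
--     They should not be counted as layer signals.
--
--     Handles:
--         if TYPE_CHECKING:
--             from sqlmodel import Session
--             from app.models.foo import Bar
--     """
--     # Pattern to match TYPE_CHECKING blocks
--     # Matches: if TYPE_CHECKING: followed by indented lines
--     lines = content.split("\n")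
--     result_lines = []
--     in_type_checking = False
--     type_checking_indent = 0
--
--     for line in lines:
--         stripped = line.lstrip()
--
--         # Check for TYPE_CHECKING block start
--         if stripped.startswith("if TYPE_CHECKING:"):
--             in_type_checking = True
--             type_checking_indent = len(line) - len(stripped)
--             continue
--
--         # If inside TYPE_CHECKING block
--         if in_type_checking:
--             # Check if we've exited the block (less indentation or empty)
--             current_indent = len(line) - len(stripped) if stripped else float("inf")
--             if stripped and current_indent <= type_checking_indent:
--                 in_type_checking = False
--                 result_lines.append(line)
--             # Skip lines inside TYPE_CHECKING block
--             continue
--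
--         result_lines.append(line)
--
--     return "\n".join(result_lines)
-- ===== SOURCE B (Python) =====
-- def strip_type_checking_blocks(content: str) -> str:
--     """Remove TYPE_CHECKING conditional blocks (index/while-loop formulation)."""
--     lines = content.split("\n")
--     out = []
--     i = 0
--     n = len(lines)
--     while i < n:
--         line = lines[i]
--         stripped = line.lstrip()
--         if stripped.startswith("if TYPE_CHECKING:"):
--             indent = len(line) - len(stripped)
--             i += 1
--             # consume the block; stop BEFORE the first non-empty line that dedents
--             while i < n:
--                 l = lines[i]
--                 s = l.lstrip()
--                 if s.startswith("if TYPE_CHECKING:"):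
--                     indent = len(l) - len(s)
--                     i += 1
--                 elif not s:
--                     i += 1
--                 elif len(l) - len(s) <= indent:
--                     break
--                 else:
--                     i += 1
--             continue
--         out.append(line)
--         i += 1
--     return "\n".join(out)
-- ===== Notes on version B (the rewrite author's own statement) =====
-- stated objective: alternative
-- what changed: Replaces A's single for-loop carrying a persistent in_type_checking/indent state machine with an explicit index and a nested while loop that consumes each TYPE_CHECKING block eagerly, stopping before the dedented line so the outer loop re-examines it.
import Mathlib
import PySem

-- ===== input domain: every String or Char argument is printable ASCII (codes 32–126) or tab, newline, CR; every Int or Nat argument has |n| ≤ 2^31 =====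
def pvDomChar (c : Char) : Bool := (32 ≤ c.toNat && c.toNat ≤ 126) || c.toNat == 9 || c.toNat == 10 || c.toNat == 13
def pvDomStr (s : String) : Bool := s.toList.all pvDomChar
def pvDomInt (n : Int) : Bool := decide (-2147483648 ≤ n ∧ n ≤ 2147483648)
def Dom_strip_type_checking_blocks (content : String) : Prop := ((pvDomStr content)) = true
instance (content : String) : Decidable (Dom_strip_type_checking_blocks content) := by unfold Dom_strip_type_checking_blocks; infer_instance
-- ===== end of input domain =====

-- B differs from A by decomposition only: an eager nested block-consuming loop instead of A's flat state machine.

-- ===== PORT A =====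
-- one fold step of A's for-loop; state = (result_lines, in_type_checking, type_checking_indent)
def stcbStepA (st : List String × Bool × Int) (line : String) : List String × Bool × Int :=
  let stripped := PySem.Str.lstrip line
  if PySem.Str.startswith stripped "if TYPE_CHECKING:" then
    (st.1, true, PySem.Str.len line - PySem.Str.len stripped)
  else if st.2.1 then
    -- 'stripped and current_indent <= type_checking_indent' (the empty case never compares, so no infinity needed)
    if stripped ≠ "" ∧ PySem.Str.len line - PySem.Str.len stripped ≤ st.2.2 then
      (st.1 ++ [line], false, st.2.2)
    else (st.1, true, st.2.2)
  else (st.1 ++ [line], st.2.1, st.2.2)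

def strip_type_checking_blocks (content : String) : String :=
  -- split? with nonempty sep is always some: getD [] is exact for content.split("\n")
  PySem.Str.join "\n" ((((PySem.Str.split? content "\n").getD []).foldl stcbStepA ([], false, 0)).1)

-- ===== PORT B =====
-- inner while loop: consume the block, returning the unconsumed suffix
def stcbSkip (indent : Int) : List String → List String
  | [] => []
  | l :: rest =>
    let s := PySem.Str.lstrip l
    if PySem.Str.startswith s "if TYPE_CHECKING:" then
      stcbSkip (PySem.Str.len l - PySem.Str.len s) rest
    else if s = "" then stcbSkip indent rest
    else if PySem.Str.len l - PySem.Str.len s ≤ indent then l :: rest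
    else stcbSkip indent rest

theorem stcbSkip_length_le (indent : Int) (xs : List String) : (stcbSkip indent xs).length ≤ xs.length := by
  induction xs generalizing indent with
  | nil => simp [stcbSkip]
  | cons l rest ih =>
    simp only [stcbSkip]
    split_ifs <;> simp <;> exact Nat.le_succ_of_le (ih _)

-- outer while loop
def stcbGo : List String → List String
  | [] => []
  | line :: rest =>
    let s := PySem.Str.lstrip line
    if PySem.Str.startswith s "if TYPE_CHECKING:" then
      stcbGo (stcbSkip (PySem.Str.len line - PySem.Str.len s) rest)
    else line :: stcbGo rest
  termination_by xs => xs.length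
  decreasing_by
    · exact Nat.lt_succ_of_le (stcbSkip_length_le _ _)
    · simp

def strip_type_checking_blocks_alt (content : String) : String :=
  PySem.Str.join "\n" (stcbGo ((PySem.Str.split? content "\n").getD []))

-- ===== PRECONDITION & SPEC =====
def Spec_strip_type_checking_blocks (content : String) (out : String) : Prop := out = strip_type_checking_blocks_alt content
instance (content : String) (out : String) : Decidable (Spec_strip_type_checking_blocks content out) := by unfold Spec_strip_type_checking_blocks; infer_instance

-- ===== CLAIM (what is proved, stated in full; the proofs are below) =====
def Claim_equal_strip_type_checking_blocks : Prop := ∀ (content : String), Dom_strip_type_checking_blocks content → Spec_strip_type_checking_blocks content (strip_type_checking_blocks content)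

-- ===== LEMMAS AND PROOFS =====

theorem stepA_start (acc : List String) (b : Bool) (ind : Int) (l : String)
    (h : PySem.Str.startswith (PySem.Str.lstrip l) "if TYPE_CHECKING:" = true) :
    stcbStepA (acc, b, ind) l = (acc, true, PySem.Str.len l - PySem.Str.len (PySem.Str.lstrip l)) := by
  unfold stcbStepA; rw [if_pos h]

theorem stepA_plain (acc : List String) (ind : Int) (l : String)
    (h : ¬ PySem.Str.startswith (PySem.Str.lstrip l) "if TYPE_CHECKING:" = true) :
    stcbStepA (acc, false, ind) l = (acc ++ [l], false, ind) := by
  unfold stcbStepA; rw [if_neg h]; rfl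

theorem stepA_exit (acc : List String) (ind : Int) (l : String)
    (h : ¬ PySem.Str.startswith (PySem.Str.lstrip l) "if TYPE_CHECKING:" = true)
    (h2 : PySem.Str.lstrip l ≠ "" ∧ PySem.Str.len l - PySem.Str.len (PySem.Str.lstrip l) ≤ ind) :
    stcbStepA (acc, true, ind) l = (acc ++ [l], false, ind) := by
  unfold stcbStepA; rw [if_neg h, if_pos rfl, if_pos h2]

theorem stepA_stay (acc : List String) (ind : Int) (l : String)
    (h : ¬ PySem.Str.startswith (PySem.Str.lstrip l) "if TYPE_CHECKING:" = true)
    (h2 : ¬ (PySem.Str.lstrip l ≠ "" ∧ PySem.Str.len l - PySem.Str.len (PySem.Str.lstrip l) ≤ ind)) :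
    stcbStepA (acc, true, ind) l = (acc, true, ind) := by
  unfold stcbStepA; rw [if_neg h, if_pos rfl, if_neg h2]

theorem skip_start (ind : Int) (l : String) (rest : List String)
    (h : PySem.Str.startswith (PySem.Str.lstrip l) "if TYPE_CHECKING:" = true) :
    stcbSkip ind (l :: rest) = stcbSkip (PySem.Str.len l - PySem.Str.len (PySem.Str.lstrip l)) rest := by
  simp only [stcbSkip]; rw [if_pos h]

theorem skip_empty (ind : Int) (l : String) (rest : List String)
    (h : ¬ PySem.Str.startswith (PySem.Str.lstrip l) "if TYPE_CHECKING:" = true)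
    (he : PySem.Str.lstrip l = "") :
    stcbSkip ind (l :: rest) = stcbSkip ind rest := by
  simp only [stcbSkip]; rw [if_neg h, if_pos he]

theorem skip_exit (ind : Int) (l : String) (rest : List String)
    (h : ¬ PySem.Str.startswith (PySem.Str.lstrip l) "if TYPE_CHECKING:" = true)
    (he : ¬ PySem.Str.lstrip l = "")
    (hle : PySem.Str.len l - PySem.Str.len (PySem.Str.lstrip l) ≤ ind) :
    stcbSkip ind (l :: rest) = l :: rest := by
  simp only [stcbSkip]; rw [if_neg h, if_neg he, if_pos hle]

theorem skip_stay (ind : Int) (l : String) (rest : List String)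
    (h : ¬ PySem.Str.startswith (PySem.Str.lstrip l) "if TYPE_CHECKING:" = true)
    (he : ¬ PySem.Str.lstrip l = "")
    (hle : ¬ PySem.Str.len l - PySem.Str.len (PySem.Str.lstrip l) ≤ ind) :
    stcbSkip ind (l :: rest) = stcbSkip ind rest := by
  simp only [stcbSkip]; rw [if_neg h, if_neg he, if_neg hle]

theorem go_start (l : String) (rest : List String)
    (h : PySem.Str.startswith (PySem.Str.lstrip l) "if TYPE_CHECKING:" = true) :
    stcbGo (l :: rest) = stcbGo (stcbSkip (PySem.Str.len l - PySem.Str.len (PySem.Str.lstrip l)) rest) := by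
  rw [stcbGo]; rw [if_pos h]

theorem go_cons (l : String) (rest : List String)
    (h : ¬ PySem.Str.startswith (PySem.Str.lstrip l) "if TYPE_CHECKING:" = true) :
    stcbGo (l :: rest) = l :: stcbGo rest := by
  rw [stcbGo]; rw [if_neg h]

theorem stcb_fold_eq (xs : List String) :
    (∀ acc ind, (xs.foldl stcbStepA (acc, false, ind)).1 = acc ++ stcbGo xs) ∧
    (∀ acc ind, (xs.foldl stcbStepA (acc, true, ind)).1 = acc ++ stcbGo (stcbSkip ind xs)) := by
  induction xs with
  | nil => simp [stcbGo, stcbSkip]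
  | cons l rest ih =>
    constructor
    · intro acc ind
      rw [List.foldl_cons]
      by_cases h : PySem.Str.startswith (PySem.Str.lstrip l) "if TYPE_CHECKING:" = true
      · rw [stepA_start _ _ _ _ h, ih.2, go_start _ _ h]
      · rw [stepA_plain _ _ _ h, ih.1, go_cons _ _ h, List.append_assoc, List.singleton_append]
    · intro acc ind
      rw [List.foldl_cons]
      by_cases h : PySem.Str.startswith (PySem.Str.lstrip l) "if TYPE_CHECKING:" = true
      · rw [stepA_start _ _ _ _ h, ih.2, skip_start _ _ _ h]
      · by_cases he : PySem.Str.lstrip l = ""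
        · rw [stepA_stay _ _ _ h (by simp [he]), ih.2, skip_empty _ _ _ h he]
        · by_cases hle : PySem.Str.len l - PySem.Str.len (PySem.Str.lstrip l) ≤ ind
          · rw [stepA_exit _ _ _ h ⟨he, hle⟩, ih.1, skip_exit _ _ _ h he hle,
              go_cons _ _ h, List.append_assoc, List.singleton_append]
          · rw [stepA_stay _ _ _ h (by tauto), ih.2, skip_stay _ _ _ h he hle]

-- ===== VERDICT (by name: the statement is the Claim_ definition above) =====
theorem strip_type_checking_blocks_spec : Claim_equal_strip_type_checking_blocks := by
  intro content _
  unfold Spec_strip_type_checking_blocks strip_type_checking_blocks strip_type_checking_blocks_alt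
  rw [(stcb_fold_eq _).1, List.nil_append]
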